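-- pv_equiv track=rewrite | github.com/anisssum/DNA_RNA_aminoacid_tools | modules/aminoacid_functions.py | folding
-- ===== SOURCE A (Python) =====
-- def folding(seq: str) -> str:
--     """
--     Counts the number of amino acids characteristic separately for alpha helixes and beta sheets,
--     and gives out what will be the structure of the protein more.
--     This function has been tested on proteins such as 2M3X, 6DT4 (PDB ID) and MHC, CRP.
--     The obtained results corresponded to reality.
--         Parameters:
--             seq (str): amino acid sequence
--         Returns:
--             (str): overcoming structure ('alfa_helix', 'beta_sheet', 'equally')
--     """
--     alfa_helix = ['A', 'E', 'L', 'M', 'G', 'Y', 'S', 'a', 'e', 'l', 'm', 'g', 'y', 's']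
--     beta_sheet = ['Y', 'F', 'W', 'T', 'V', 'I', 'y', 'f', 'w', 't', 'v', 'i']
--     alfa_helix_counts = 0
--     beta_sheet_counts = 0
--     for amino_acid in seq:
--         if amino_acid in alfa_helix:
--             alfa_helix_counts += 1
--         elif amino_acid in beta_sheet:
--             beta_sheet_counts += 1
--     if alfa_helix_counts > beta_sheet_counts:
--         return 'alfa_helix'
--     elif alfa_helix_counts < beta_sheet_counts:
--         return 'beta_sheet'
--     elif alfa_helix_counts == beta_sheet_counts:
--         return 'equally'
-- ===== SOURCE B (Python) =====
-- def folding(seq: str) -> str: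
--     freq = {}
--     for amino_acid in seq:
--         freq[amino_acid] = freq.get(amino_acid, 0) + 1
--     helix_letters = 'AELMGYSaelmgys'
--     # Y/y count as helix (helix has precedence), so the sheet letters exclude them
--     sheet_letters = 'FWTVIfwtvi'
--     alfa_helix_counts = sum(freq.get(ch, 0) for ch in helix_letters)
--     beta_sheet_counts = sum(freq.get(ch, 0) for ch in sheet_letters)
--     if alfa_helix_counts > beta_sheet_counts:
--         return 'alfa_helix'
--     if alfa_helix_counts < beta_sheet_counts:
--         return 'beta_sheet'
--     return 'equally'
-- ===== Notes on version B (the rewrite author's own statement) =====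
-- stated objective: faster
-- what changed: Replaces the single pass doing two list-membership scans per character by a frequency table built in one dict pass plus per-letter sums over the helix/sheet alphabets (sheet alphabet minus Y/y to preserve the elif precedence).
import Mathlib
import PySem

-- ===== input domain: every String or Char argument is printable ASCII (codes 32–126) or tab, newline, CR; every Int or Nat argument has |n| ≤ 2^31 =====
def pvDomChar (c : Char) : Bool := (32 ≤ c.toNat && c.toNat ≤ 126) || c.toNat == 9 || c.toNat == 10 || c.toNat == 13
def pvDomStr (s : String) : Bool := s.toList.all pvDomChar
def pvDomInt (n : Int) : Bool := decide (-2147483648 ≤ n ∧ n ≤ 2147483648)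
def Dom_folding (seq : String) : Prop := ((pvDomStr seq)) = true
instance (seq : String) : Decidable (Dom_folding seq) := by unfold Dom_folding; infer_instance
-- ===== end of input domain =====

-- B builds a frequency table once and sums it over the two letter alphabets; A scans both alphabets per character.

-- ===== PORT A =====
def folding (seq : String) : String :=
  let alfa_helix : List Char := ['A','E','L','M','G','Y','S','a','e','l','m','g','y','s']
  let beta_sheet : List Char := ['Y','F','W','T','V','I','y','f','w','t','v','i']
  let counts := seq.toList.foldl (fun (p : Int × Int) amino_acid =>
    if amino_acid ∈ alfa_helix then (p.1 + 1, p.2)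
    else if amino_acid ∈ beta_sheet then (p.1, p.2 + 1)
    else p) (0, 0)
  if counts.1 > counts.2 then "alfa_helix"
  else if counts.1 < counts.2 then "beta_sheet"
  else "equally"

-- ===== PORT B =====
def folding_alt (seq : String) : String :=
  let freq : PySem.Dict Char Int :=
    seq.toList.foldl (fun d amino_acid => d.insert amino_acid (d.getD amino_acid 0 + 1)) PySem.Dict.empty
  let helix_letters := "AELMGYSaelmgys"
  let sheet_letters := "FWTVIfwtvi"
  let alfa_helix_counts := (helix_letters.toList.map (fun ch => freq.getD ch 0)).sum
  let beta_sheet_counts := (sheet_letters.toList.map (fun ch => freq.getD ch 0)).sum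
  if alfa_helix_counts > beta_sheet_counts then "alfa_helix"
  else if alfa_helix_counts < beta_sheet_counts then "beta_sheet"
  else "equally"

-- ===== PRECONDITION & SPEC =====
def Spec_folding (seq : String) (out : String) : Prop := out = folding_alt seq
instance (seq : String) (out : String) : Decidable (Spec_folding seq out) := by unfold Spec_folding; infer_instance

-- ===== CLAIM (what is proved, stated in full; the proofs are below) =====
def Claim_equal_folding : Prop := ∀ (seq : String), Dom_folding seq → Spec_folding seq (folding seq)

-- ===== LEMMAS AND PROOFS =====

-- the sheet `elif` branch fires exactly on the reduced sheet alphabet (Y/y removed)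
lemma sheet_pred (c : Char) :
    (decide (¬ c ∈ (['A','E','L','M','G','Y','S','a','e','l','m','g','y','s'] : List Char) ∧
       c ∈ (['Y','F','W','T','V','I','y','f','w','t','v','i'] : List Char)))
    = decide (c ∈ (['F','W','T','V','I','f','w','t','v','i'] : List Char)) := by
  simp only [decide_eq_decide]
  constructor
  · rintro ⟨hn, hs⟩
    fin_cases hs <;> first | decide | exact absurd (by decide) hn
  · intro h
    fin_cases h <;> exact ⟨by decide, by decide⟩

-- A's loop computes the two countP's
lemma foldA (l : List Char) (p : Int × Int) :
    l.foldl (fun (p : Int × Int) c =>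
      if c ∈ (['A','E','L','M','G','Y','S','a','e','l','m','g','y','s'] : List Char) then (p.1 + 1, p.2)
      else if c ∈ (['Y','F','W','T','V','I','y','f','w','t','v','i'] : List Char) then (p.1, p.2 + 1)
      else p) p
    = (p.1 + (l.countP (fun c => decide (c ∈ (['A','E','L','M','G','Y','S','a','e','l','m','g','y','s'] : List Char))) : Int),
       p.2 + (l.countP (fun c => decide (¬ c ∈ (['A','E','L','M','G','Y','S','a','e','l','m','g','y','s'] : List Char) ∧
         c ∈ (['Y','F','W','T','V','I','y','f','w','t','v','i'] : List Char))) : Int)) := by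
  induction l generalizing p with
  | nil => simp
  | cons a l ih =>
    simp only [List.foldl_cons, List.countP_cons, ih]
    by_cases h1 : a ∈ (['A','E','L','M','G','Y','S','a','e','l','m','g','y','s'] : List Char) <;>
      by_cases h2 : a ∈ (['Y','F','W','T','V','I','y','f','w','t','v','i'] : List Char) <;>
        simp [h1, h2] <;> ring

-- summing per-letter counts over a duplicate-free alphabet is counting membership
lemma sum_count (H : List Char) (hH : H.Nodup) (l : List Char) :
    (H.map (fun ch => ((l.count ch : Int)))).sum
      = (l.countP (fun c => decide (c ∈ H)) : Int) := by
  induction l with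
  | nil => simp
  | cons a l ih =>
    have hcnt : ∀ ch : Char, ((a :: l).count ch : Int) = (l.count ch : Int) + (if a = ch then 1 else 0) := by
      intro ch
      rcases eq_or_ne a ch with h | h <;> simp [h]
    have hind : (H.map (fun ch => (if a = ch then (1 : Int) else 0))).sum = if a ∈ H then 1 else 0 := by
      clear ih
      induction H with
      | nil => simp
      | cons b H ihH =>
        rcases List.nodup_cons.mp hH with ⟨hb, hH'⟩
        rcases eq_or_ne a b with h | h
        · subst h; simp [ihH, hb, hH']
        · simp [ihH hH', h]
    calc (H.map (fun ch => ((a :: l).count ch : Int))).sum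
        = (H.map (fun ch => (l.count ch : Int) + (if a = ch then 1 else 0))).sum := by
          simp only [hcnt]
      _ = (H.map (fun ch => (l.count ch : Int))).sum + (H.map (fun ch => (if a = ch then (1:Int) else 0))).sum :=
          PySem.List.sum_map_add_int H _ _
      _ = _ := by
          rw [ih, hind, List.countP_cons]
          by_cases hmem : a ∈ H <;> simp [hmem]

-- ===== VERDICT (by name: the statement is the Claim_ definition above) =====
theorem folding_spec : Claim_equal_folding := by
  intro seq _
  unfold Spec_folding folding folding_alt
  simp only [PySem.Dict.foldl_insert_getD_add_one_eq_counter, PySem.Dict.getD_counter]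
  rw [foldA]
  rw [show ("AELMGYSaelmgys".toList) = (['A','E','L','M','G','Y','S','a','e','l','m','g','y','s'] : List Char) from rfl]
  rw [show ("FWTVIfwtvi".toList) = (['F','W','T','V','I','f','w','t','v','i'] : List Char) from rfl]
  rw [sum_count _ (by decide) seq.toList, sum_count _ (by decide) seq.toList]
  rw [show (fun c => decide (c ∈ (['F','W','T','V','I','f','w','t','v','i'] : List Char)))
        = (fun c => decide (¬ c ∈ (['A','E','L','M','G','Y','S','a','e','l','m','g','y','s'] : List Char) ∧
            c ∈ (['Y','F','W','T','V','I','y','f','w','t','v','i'] : List Char)))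
      from funext fun c => (sheet_pred c).symm]
  simp
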